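-- pv_equiv track=rewrite | github.com/HarshitGupta3017/LeetCode-Daily | Smallest Missing Non-negative Integer After Operations/Smallest Missing Non-negative Integer After Operations.py | findSmallestInteger
-- ===== SOURCE A (Python) =====
-- from typing import List
--
-- def findSmallestInteger(nums: List[int], value: int) -> int:
--     n = len(nums)
--
--     # List to store the frequency of each remainder class modulo 'value'
--     remainder_frequency = [0] * value
--
--     # Count how many numbers fall into each remainder class (0 to value - 1)
--     for num in nums:
--         remainder = (num % value + value) % value
--         remainder_frequency[remainder] += 1
--
--     current_number = 0
--
--     # Try to build each integer starting from 0
--     while True: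
--         remainder_class = current_number % value
--
--         if remainder_frequency[remainder_class] > 0:
--             remainder_frequency[remainder_class] -= 1
--             current_number += 1
--         else:
--             # If we can't build this number, it's the MEX (minimum excluded)
--             return current_number
-- ===== SOURCE B (Python) =====
-- from typing import List
--
-- def findSmallestInteger(nums: List[int], value: int) -> int:
--     freq = [0] * value
--     for num in nums:
--         freq[num % value] += 1
--     m = min(freq)
--     return m * value + freq.index(m)
-- ===== Notes on version B (the rewrite author's own statement) =====
-- stated objective: simpler
-- what changed: A's incremental while-loop that simulates building 0,1,2,... by decrementing remainder counts is replaced by a closed form over the remainder-frequency array: answer = min(freq)*value + index of the first minimum.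
import Mathlib
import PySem

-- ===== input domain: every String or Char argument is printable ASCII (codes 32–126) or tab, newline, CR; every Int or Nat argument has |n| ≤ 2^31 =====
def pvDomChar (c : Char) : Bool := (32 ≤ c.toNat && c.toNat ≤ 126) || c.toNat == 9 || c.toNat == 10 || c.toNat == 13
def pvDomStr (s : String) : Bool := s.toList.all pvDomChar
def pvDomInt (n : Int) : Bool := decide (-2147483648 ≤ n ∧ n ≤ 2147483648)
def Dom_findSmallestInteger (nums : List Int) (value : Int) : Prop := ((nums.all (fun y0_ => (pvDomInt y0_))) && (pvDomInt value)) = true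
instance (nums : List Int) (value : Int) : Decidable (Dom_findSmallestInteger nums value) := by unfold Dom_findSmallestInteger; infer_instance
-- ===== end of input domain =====

-- B replaces A's per-integer while-loop simulation by a closed form over the remainder
-- frequencies (answer = min(freq)*value + first argmin index); objective: simpler.

-- ===== PORT A =====
-- the frequency-building for loop of A (remainder = (num % value + value) % value)
def buildFreqA (nums : List Int) (value : Int) : List Int :=
  nums.foldl (fun (f : List Int) num =>
    let r := PySem.Int.mod (PySem.Int.mod num value + value) value
    match PySem.List.pyGet? f r with
    | none => f                      -- IndexError in Python; unreachable for value > 0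
    | some c => f.set r.toNat (c + 1)) (List.replicate value.toNat 0)

-- A's 'while True' loop; fuel = len(nums)+1 always suffices when value > 0 (Pre_),
-- since the loop runs at most sum(freq)+1 = len(nums)+1 iterations before returning.
def loopA (value : Int) : List Int → Int → Nat → Int
  | _, cur, 0 => cur                 -- never reached under Pre_
  | f, cur, fuel+1 =>
    let rc := PySem.Int.mod cur value
    match PySem.List.pyGet? f rc with
    | none => cur                    -- IndexError in Python; unreachable for value > 0
    | some c =>
      if c > 0 then loopA value (f.set rc.toNat (c - 1)) (cur + 1) fuel
      else cur

def findSmallestInteger (nums : List Int) (value : Int) : Int :=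
  loopA value (buildFreqA nums value) 0 (nums.length + 1)

-- ===== PORT B =====
def findSmallestInteger_alt (nums : List Int) (value : Int) : Int :=
  let freq := nums.foldl (fun (f : List Int) num =>
    let r := PySem.Int.mod num value
    match PySem.List.pyGet? f r with
    | none => f                      -- IndexError in Python; unreachable for value > 0
    | some c => f.set r.toNat (c + 1)) (List.replicate value.toNat 0)
  match PySem.List.min? freq (fun x => x) with
  | none => 0                        -- min([]) ValueError; unreachable for value > 0
  | some m =>
    match PySem.List.index? freq m with
    | none => 0                      -- unreachable: m ∈ freq
    | some r => m * value + (r : Int)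

-- ===== PRECONDITION & SPEC =====
-- Pre_ excludes exactly value ≤ 0, where Python A raises (ZeroDivisionError for
-- value = 0, IndexError into the empty frequency list for value < 0).
def Pre_findSmallestInteger (nums : List Int) (value : Int) : Prop := 0 < value
instance (nums : List Int) (value : Int) : Decidable (Pre_findSmallestInteger nums value) := by unfold Pre_findSmallestInteger; infer_instance
def pvWitness_findSmallestInteger : List Int × Int := ([1, 5, 3, 0, -4], 3)
def Spec_findSmallestInteger (nums : List Int) (value : Int) (out : Int) : Prop := out = findSmallestInteger_alt nums value
instance (nums : List Int) (value : Int) (out : Int) : Decidable (Spec_findSmallestInteger nums value out) := by unfold Spec_findSmallestInteger; infer_instance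

-- ===== CLAIM (what is proved, stated in full; the proofs are below) =====
def Claim_equal_findSmallestInteger : Prop := ∀ (nums : List Int) (value : Int), Dom_findSmallestInteger nums value → Pre_findSmallestInteger nums value → Spec_findSmallestInteger nums value (findSmallestInteger nums value)

-- ===== LEMMAS AND PROOFS =====

-- A's double mod equals B's single mod for a positive modulus
lemma double_mod (num value : Int) (hv : 0 < value) :
    PySem.Int.mod (PySem.Int.mod num value + value) value = PySem.Int.mod num value := by
  rw [PySem.Int.mod_eq_emod_of_pos hv, PySem.Int.mod_eq_emod_of_pos hv,
    Int.add_emod_right, Int.emod_emod_of_dvd num dvd_rfl]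

-- the two ports build the same frequency list
lemma build_eq (nums : List Int) (value : Int) (hv : 0 < value) :
    buildFreqA nums value =
      nums.foldl (fun (f : List Int) num =>
        let r := PySem.Int.mod num value
        match PySem.List.pyGet? f r with
        | none => f
        | some c => f.set r.toNat (c + 1)) (List.replicate value.toNat 0) := by
  unfold buildFreqA
  apply List.foldl_ext
  intro acc x hx
  simp only [double_mod x value hv]

-- invariant of the building fold: length, nonnegativity, total count
lemma build_inv (value : Int) (hv : 0 < value) (nums : List Int) (f0 : List Int)
    (hl : f0.length = value.toNat) (hn : ∀ x ∈ f0, 0 ≤ x) :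
    (nums.foldl (fun (f : List Int) num =>
        let r := PySem.Int.mod num value
        match PySem.List.pyGet? f r with
        | none => f
        | some c => f.set r.toNat (c + 1)) f0).length = value.toNat ∧
    (∀ x ∈ (nums.foldl (fun (f : List Int) num =>
        let r := PySem.Int.mod num value
        match PySem.List.pyGet? f r with
        | none => f
        | some c => f.set r.toNat (c + 1)) f0), 0 ≤ x) ∧
    (nums.foldl (fun (f : List Int) num =>
        let r := PySem.Int.mod num value
        match PySem.List.pyGet? f r with
        | none => f
        | some c => f.set r.toNat (c + 1)) f0).sum = f0.sum + nums.length := by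
  induction nums generalizing f0 with
  | nil => simpa using ⟨hl, hn⟩
  | cons num rest ih =>
    have hr0 : 0 ≤ PySem.Int.mod num value := PySem.Int.mod_nonneg num hv
    have hrlt : PySem.Int.mod num value < value := PySem.Int.mod_lt num hv
    have hidx : (PySem.Int.mod num value).toNat < f0.length := by omega
    have hget : PySem.List.pyGet? f0 (PySem.Int.mod num value) =
        some (f0[(PySem.Int.mod num value).toNat]'hidx) := by
      exact PySem.List.pyGet?_eq_some_getElem f0 hr0 (by omega)
    have hstep : (fun (f : List Int) num =>
        let r := PySem.Int.mod num value
        match PySem.List.pyGet? f r with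
        | none => f
        | some c => f.set r.toNat (c + 1)) f0 num =
        f0.set (PySem.Int.mod num value).toNat (f0[(PySem.Int.mod num value).toNat]'hidx + 1) := by
      simp only [hget]
    simp only [List.foldl_cons, hstep]
    obtain ⟨ih1, ih2, ih3⟩ := ih (f0.set (PySem.Int.mod num value).toNat
        (f0[(PySem.Int.mod num value).toNat]'hidx + 1))
      (by simpa using hl)
      (by intro x hx
          rcases List.mem_or_eq_of_mem_set hx with h | h
          · exact hn x h
          · have := hn _ (List.getElem_mem hidx); omega)
    refine ⟨ih1, ih2, ?_⟩
    rw [ih3, List.sum_set']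
    rw [dif_pos hidx]
    push_cast [List.length_cons]
    ring

lemma cell_unique {q j M r L : Nat} (hj : j < L) (hr : r < L)
    (h : q * L + j = M * L + r) : q = M ∧ j = r := by
  rcases Nat.lt_trichotomy q M with hlt | heq | hgt
  · have h2 : (q + 1) * L ≤ M * L := Nat.mul_le_mul_right L hlt
    have h3 : (q + 1) * L = q * L + L := by ring
    omega
  · subst heq; omega
  · have h2 : (M + 1) * L ≤ q * L := Nat.mul_le_mul_right L hgt
    have h3 : (M + 1) * L = M * L + L := by ring
    omega

lemma cell_lt {q j M r L : Nat} (hj : j < L) (hr : r < L)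
    (h : q * L + j < M * L + r) : q < M ∨ (q = M ∧ j < r) := by
  rcases Nat.lt_trichotomy q M with hlt | heq | hgt
  · exact Or.inl hlt
  · exact Or.inr ⟨heq, by subst heq; omega⟩
  · have h2 : (M + 1) * L ≤ q * L := Nat.mul_le_mul_right L hgt
    have h3 : (M + 1) * L = M * L + L := by ring
    omega

-- lower bound on the total count: sum ≥ m*len + r when every entry is ≥ m and the
-- first r entries are ≥ m+1
lemma sum_lb : ∀ (f : List Int) (m : Int) (r : Nat),
    (∀ i (h : i < f.length), m ≤ f[i]) →
    (∀ i, i < r → ∀ (h : i < f.length), m + 1 ≤ f[i]) →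
    r ≤ f.length → m * f.length + r ≤ f.sum
  | [], m, r => by intro _ _ hr; simp_all
  | x :: t, m, r => by
    intro hmin hfirst hr
    have htmin : ∀ i (h : i < t.length), m ≤ t[i] := by
      intro i h
      have := hmin (i+1) (by simpa using Nat.succ_lt_succ h)
      simpa using this
    cases r with
    | zero =>
      have hx : m ≤ x := by simpa using hmin 0 (by simp)
      have ht := sum_lb t m 0 htmin (by omega) (by omega)
      simp only [List.sum_cons, List.length_cons]
      push_cast
      have e : m * ((t.length : Int) + 1) = m * t.length + m := by ring
      push_cast at ht
      linarith
    | succ s =>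
      have hx : m + 1 ≤ x := by simpa using hfirst 0 (by omega) (by simp)
      have htfirst : ∀ i, i < s → ∀ (h : i < t.length), m + 1 ≤ t[i] := by
        intro i his h
        have := hfirst (i+1) (by omega) (by simpa using Nat.succ_lt_succ h)
        simpa using this
      have ht := sum_lb t m s htmin htfirst (by simpa using Nat.lt_succ_iff.mp hr)
      simp only [List.sum_cons, List.length_cons]
      push_cast
      have e : m * ((t.length : Int) + 1) = m * t.length + m := by ring
      push_cast at ht
      linarith

-- main loop lemma: from state (q,j) with frequencies f minus what was consumed so far,
-- A's loop returns m*value + r (m = min of f, r = first argmin of f)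
lemma loop_main (value : Int) (hv : 0 < value) (f : List Int)
    (hfl : f.length = value.toNat) (m : Int) (hm0 : 0 ≤ m) (r : Nat)
    (hr : r < f.length) (hfr : f[r] = m)
    (hmin : ∀ i (h : i < f.length), m ≤ f[i])
    (hfirst : ∀ i, i < r → ∀ (h : i < f.length), m + 1 ≤ f[i]) :
    ∀ (fuel : Nat) (g : List Int) (q j : Nat)
      (hlg : g.length = f.length) (hj : j < f.length)
      (hg : ∀ i (h : i < f.length), g[i]'(by omega) = f[i] - q - (if i < j then 1 else 0))
      (hle : q * f.length + j ≤ m.toNat * f.length + r)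
      (hfuel : m.toNat * f.length + r < q * f.length + j + fuel),
      loopA value g ((q * f.length + j : Nat) : Int) fuel = m * value + r := by
  intro fuel
  induction fuel with
  | zero => intro g q j hlg hj hg hle hfuel; omega
  | succ fuel ih =>
    intro g q j hlg hj hg hle hfuel
    have hjg : j < g.length := by omega
    have hcur : PySem.Int.mod ((q * f.length + j : Nat) : Int) value = ((j : Nat) : Int) := by
      conv_lhs => rw [show value = ((value.toNat : Nat) : Int) from (Int.toNat_of_nonneg hv.le).symm]
      rw [PySem.Int.mod_natCast, ← hfl, Nat.mul_add_mod_self_right, Nat.mod_eq_of_lt hj]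
    simp only [loopA, hcur, PySem.List.pyGet?_natCast, List.getElem?_eq_getElem hjg,
      Int.toNat_natCast]
    have hc : g[j]'hjg = f[j] - (q : Int) := by
      have := hg j hj
      simpa using this
    by_cases hstop : q = m.toNat ∧ j = r
    · obtain ⟨hq, hjr⟩ := hstop
      subst hq
      subst hjr
      rw [if_neg (by have h2 := Int.toNat_of_nonneg hm0; omega)]
      have h2v : ((f.length : Nat) : Int) = value := by
        rw [hfl]; exact Int.toNat_of_nonneg hv.le
      push_cast
      rw [Int.toNat_of_nonneg hm0, h2v]
    · have hlt : q * f.length + j < m.toNat * f.length + r := by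
        rcases Nat.lt_or_ge (q * f.length + j) (m.toNat * f.length + r) with h | h
        · exact h
        · exact absurd (cell_unique hj hr (Nat.le_antisymm hle h)) hstop
      have hpos : 0 < g[j]'hjg := by
        rcases cell_lt hj hr hlt with hqM | ⟨hqM, hjr⟩
        · have h1 := hmin j hj
          have h2 := Int.toNat_of_nonneg hm0
          omega
        · have h1 := hfirst j hjr hj
          have h2 := Int.toNat_of_nonneg hm0
          omega
      rw [if_pos hpos]
      have hstepc : ((q * f.length + j : Nat) : Int) + 1 = ((q * f.length + j + 1 : Nat) : Int) := by
        push_cast; ring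
      rw [hstepc]
      by_cases hjL : j + 1 < f.length
      · rw [show q * f.length + j + 1 = q * f.length + (j + 1) from rfl]
        refine ih (g.set j (g[j]'hjg - 1)) q (j+1) (by simpa using hlg) hjL ?_ (by omega) (by omega)
        intro i hi
        have hgi := hg i hi
        by_cases hij : j = i
        · subst hij
          rw [List.getElem_set, if_pos rfl]
          split_ifs at hgi ⊢ <;> omega
        · rw [List.getElem_set, if_neg hij]
          split_ifs at hgi ⊢ <;> omega
      · have hjL' : j + 1 = f.length := by omega
        have e1 : (q+1) * f.length = q * f.length + f.length := by ring
        rw [show q * f.length + j + 1 = (q+1) * f.length + 0 from by omega]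
        refine ih (g.set j (g[j]'hjg - 1)) (q+1) 0 (by simpa using hlg) (by omega) ?_
          (by omega) (by omega)
        intro i hi
        have hgi := hg i hi
        by_cases hij : j = i
        · subst hij
          rw [List.getElem_set, if_pos rfl]
          split_ifs at hgi ⊢ <;> omega
        · rw [List.getElem_set, if_neg hij]
          split_ifs at hgi ⊢ <;> omega

theorem equiv_main (nums : List Int) (value : Int) (hv : 0 < value) :
    findSmallestInteger nums value = findSmallestInteger_alt nums value := by
  simp only [findSmallestInteger, findSmallestInteger_alt]
  rw [build_eq nums value hv]
  obtain ⟨hlen, hnn, hsum⟩ := build_inv value hv nums (List.replicate value.toNat 0)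
    (by simp) (by intro x hx; rw [List.eq_of_mem_replicate hx])
  set F := nums.foldl (fun (f : List Int) num =>
    let r := PySem.Int.mod num value
    match PySem.List.pyGet? f r with
    | none => f
    | some c => f.set r.toNat (c + 1)) (List.replicate value.toNat 0) with hF
  have hsum' : F.sum = (nums.length : Int) := by simpa using hsum
  have hLpos : 0 < F.length := by rw [hlen]; omega
  cases hmq : PySem.List.min? F (fun x => x) with
  | none =>
    rw [PySem.List.min?_eq_none_iff] at hmq
    rw [hmq] at hLpos
    simp at hLpos
  | some m =>
    have hmem : m ∈ F := PySem.List.min?_mem hmq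
    have hminy := PySem.List.min?_isMin hmq
    have hmin : ∀ i (h : i < F.length), m ≤ F[i] := fun i h => hminy _ (List.getElem_mem h)
    have hm0 : 0 ≤ m := hnn m hmem
    cases hrq : PySem.List.index? F m with
    | none =>
      exact absurd hmem ((PySem.List.index?_eq_none_iff F m).mp hrq)
    | some r =>
      obtain ⟨hk, hfr, hprev⟩ := PySem.List.getElem_of_index?_eq_some hrq
      have hfirst : ∀ i, i < r → ∀ (h : i < F.length), m + 1 ≤ F[i] := by
        intro i hir h
        have h1 := hmin i h
        have h2 := hprev i hir
        omega
      have hsumlb := sum_lb F m r hmin hfirst (le_of_lt hk)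
      have hcst : ((m.toNat * F.length + r : Nat) : Int) = m * (F.length : Int) + (r : Int) := by
        push_cast [Int.toNat_of_nonneg hm0]
        ring
      have hfin : m.toNat * F.length + r < nums.length + 1 := by
        have h5 : ((m.toNat * F.length + r : Nat) : Int) ≤ (nums.length : Int) := by
          rw [hcst, ← hsum']; exact hsumlb
        omega
      have hmain := loop_main value hv F hlen m hm0 r hk hfr hmin hfirst
        (nums.length + 1) F 0 0 rfl (by omega) (by intro i h; simp) (by omega) (by omega)
      have hrq' : List.idxOf? m F = some r := by
        simpa [PySem.List.index?_eq_idxOf?] using hrq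
      simpa [hrq'] using hmain

-- ===== VERDICT (by name: the statement is the Claim_ definition above) =====
theorem findSmallestInteger_spec : Claim_equal_findSmallestInteger := by
  intro nums value _ hpre
  exact equiv_main nums value hpre
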